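-- pv_equiv track=rewrite | github.com/jakehoare/leetcode | python_1001_to_2000/1139_Largest_1-Bordered_Square.py | largest1BorderedSquare
-- ===== SOURCE A (Python) =====
-- def largest1BorderedSquare(grid):
--     """
--     :type grid: List[List[int]]
--     :rtype: int
--     """
--     rows, cols = len(grid), len(grid[0])
--     best = 0
--
--     for row in range(rows):
--         sequence = 0
--         for col in range(cols):
--             if best >= rows - row:  # insufficient rows to make a bigger square
--                 return best * best
--
--             if grid[row][col] == 1:
--                 sequence += 1
--             else:
--                 sequence = 0
--             if best >= sequence :  # insufficient sequence to make a bigger square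
--                 continue
--
--             for side in range(min(sequence, rows - row), best, -1): # check decreasing side from largest possible
--                 if not all(grid[r][col] and grid[r][col - side + 1] for r in range(row + 1, row + side)):
--                     continue    # left and right edges must be populated
--                 if not all(grid[row + side - 1][col - side + 1:col + 1]):
--                     continue    # bottom edge must be populated
--                 best = side
--                 break           # no need to check smaller sides
--
--     return best * best
-- ===== SOURCE B (Python) =====
-- def largest1BorderedSquare(grid):
--     rows, cols = len(grid), len(grid[0])
--     # h[r][c] / v[r][c]: length of the run of populated (truthy) cells ending at
--     # (r, c), going left / up; computed once in a single pass
--     h, v = [], []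
--     vprev = [0] * cols
--     for row in grid:
--         hrow, vrow = [], []
--         run = 0
--         for x, up in zip(row, vprev):
--             run = run + 1 if x else 0
--             hrow.append(run)
--             vrow.append(up + 1 if x else 0)
--         h.append(hrow)
--         v.append(vrow)
--         vprev = vrow
--     best = 0
--     for r in range(rows):
--         seq = 0  # run of 1s ending at (r, c): candidate top edges
--         for c in range(cols):
--             seq = seq + 1 if grid[r][c] == 1 else 0
--             s = min(seq, rows - r)
--             while s > best:  # largest side first; each border check is O(1)
--                 rb = r + s - 1
--                 if h[rb][c] >= s and v[rb][c] >= s - 1 and v[rb][c - s + 1] >= s - 1: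
--                     best = s
--                     break
--                 s -= 1
--     return best * best
-- ===== Notes on version B (the rewrite author's own statement) =====
-- stated objective: alternative
-- what changed: B precomputes horizontal and vertical truthy-run tables in one pass and checks each candidate square's border in O(1) table lookups, replacing A's O(side) per-candidate edge scans and early-exit row pruning; Pre_ excludes only the empty grid and ragged grids with a row shorter than row 0, where A in general raises IndexError (it returns only when an early exit fires first) and B raises IndexError.
-- outside the precondition, e.g. on largest1BorderedSquare([[1], []]): A returns 1, B raises IndexError
import Mathlib
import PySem

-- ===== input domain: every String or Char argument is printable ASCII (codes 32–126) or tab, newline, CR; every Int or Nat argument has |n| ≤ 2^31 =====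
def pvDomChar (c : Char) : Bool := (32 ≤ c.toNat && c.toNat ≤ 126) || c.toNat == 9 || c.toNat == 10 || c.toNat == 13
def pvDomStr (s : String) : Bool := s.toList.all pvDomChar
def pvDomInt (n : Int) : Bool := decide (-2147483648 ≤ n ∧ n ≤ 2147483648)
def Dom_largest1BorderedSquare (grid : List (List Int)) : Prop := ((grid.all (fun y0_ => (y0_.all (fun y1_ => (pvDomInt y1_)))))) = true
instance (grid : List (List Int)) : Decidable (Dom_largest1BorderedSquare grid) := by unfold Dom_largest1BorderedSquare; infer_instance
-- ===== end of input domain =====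

-- B precomputes horizontal and vertical truthy-run tables once and checks each candidate
-- square's border in O(1) lookups, replacing A's O(side) per-candidate edge scans
-- (alternative algorithm; not measurably faster on the timed distribution).

-- ===== PORT A =====
-- termination measures of the loops (cited by name in decreasing_by)
theorem pvDecDown {a b : Int} (h : b < a) : (a - 1 - b).toNat < (a - b).toNat := by omega
theorem pvDecUp {a b : Int} (h : b < a) : (a - (b + 1)).toNat < (a - b).toNat := by omega

-- grid[r][c] for r, c that are in range and nonnegative under Pre_ (exact there)
def pvG (grid : List (List Int)) (r c : Int) : Int :=
  PySem.List.pyGetD (PySem.List.pyGetD grid r []) c 0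

-- "for side in range(min(sequence, rows - row), best, -1): … best = side; break"
def pvAside (grid : List (List Int)) (row col : Int) (side best : Int) : Int :=
  if _h : best < side then
    if ¬ ((PySem.List.pyRange (row + 1) (row + side) 1).all
            (fun r => decide (pvG grid r col ≠ 0) && decide (pvG grid r (col - side + 1) ≠ 0)) = true) then
      pvAside grid row col (side - 1) best
    else if ¬ ((PySem.List.slice (PySem.List.pyGetD grid (row + side - 1) [])
                  (some (col - side + 1)) (some (col + 1))).all (fun x => decide (x ≠ 0)) = true) then
      pvAside grid row col (side - 1) best
    else side
  else best
termination_by (side - best).toNat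
decreasing_by all_goals exact pvDecDown _h

-- the column loop; Sum.inl = the early "return best * best", Sum.inr = best at end of the row
def pvAcol (grid : List (List Int)) (rows cols row : Int) (col sequence best : Int) : Sum Int Int :=
  if _h : col < cols then
    if rows - row ≤ best then Sum.inl (best * best)
    else
      let seq := if pvG grid row col = 1 then sequence + 1 else 0
      if seq ≤ best then pvAcol grid rows cols row (col + 1) seq best
      else pvAcol grid rows cols row (col + 1) seq (pvAside grid row col (min seq (rows - row)) best)
  else Sum.inr best
termination_by (cols - col).toNat
decreasing_by all_goals exact pvDecUp _h

def pvArow (grid : List (List Int)) (rows cols : Int) (row best : Int) : Int :=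
  if _h : row < rows then
    match pvAcol grid rows cols row 0 0 best with
    | Sum.inl v => v
    | Sum.inr b => pvArow grid rows cols (row + 1) b
  else best * best
termination_by (rows - row).toNat
decreasing_by all_goals exact pvDecUp _h

def largest1BorderedSquare (grid : List (List Int)) : Int :=
  pvArow grid (grid.length : Int) ((PySem.List.pyGetD grid 0 []).length : Int) 0 0

-- ===== PORT B =====
-- one step of the scan over zip(row, vprev): appends to hrow and vrow, carries run
def pvScanStep (st : List Int × List Int × Int) (vp : Int × Int) :
    List Int × List Int × Int :=
  let run := if vp.1 ≠ 0 then st.2.2 + 1 else 0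
  (st.1 ++ [run], st.2.1 ++ [if vp.1 ≠ 0 then vp.2 + 1 else 0], run)

-- one row of table building: state (h, v, vprev)
def pvBuildStep (st : List (List Int) × List (List Int) × List Int)
    (row : List Int) : List (List Int) × List (List Int) × List Int :=
  let sc := (row.zip st.2.2).foldl pvScanStep ([], [], 0)
  (st.1 ++ [sc.1], st.2.1 ++ [sc.2.1], sc.2.1)

def pvTables (grid : List (List Int)) (cols : Nat) :
    List (List Int) × List (List Int) × List Int :=
  grid.foldl pvBuildStep ([], [], List.replicate cols 0)

-- "while s > best: … break / s -= 1"
def pvBwhile (h v : List (List Int)) (r c : Int) (s best : Int) : Int :=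
  if _h : best < s then
    if s ≤ pvG h (r + s - 1) c ∧ s - 1 ≤ pvG v (r + s - 1) c ∧
        s - 1 ≤ pvG v (r + s - 1) (c - s + 1) then s
    else pvBwhile h v r c (s - 1) best
  else best
termination_by (s - best).toNat
decreasing_by all_goals exact pvDecDown _h

def largest1BorderedSquare_alt (grid : List (List Int)) : Int :=
  let rows : Int := (grid.length : Int)
  let cols : Int := ((PySem.List.pyGetD grid 0 []).length : Int)
  let t := pvTables grid (PySem.List.pyGetD grid 0 []).length
  let best := (PySem.List.pyRange 0 rows 1).foldl (fun best r =>
      ((PySem.List.pyRange 0 cols 1).foldl (fun sb c =>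
          let s := if pvG grid r c = 1 then sb.1 + 1 else 0
          (s, pvBwhile t.1 t.2.1 r c (min s (rows - r)) sb.2)) ((0 : Int), best)).2) 0
  best * best

-- ===== PRECONDITION & SPEC =====
-- Pre_ excludes the empty grid and ragged grids with a row shorter than row 0: there A in
-- general raises IndexError (it returns only when an early exit fires before reaching the
-- short row), and B raises IndexError.
def Pre_largest1BorderedSquare (grid : List (List Int)) : Prop :=
  grid ≠ [] ∧ ∀ row ∈ grid, (grid.headD []).length ≤ row.length
instance (grid : List (List Int)) : Decidable (Pre_largest1BorderedSquare grid) := by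
  unfold Pre_largest1BorderedSquare; infer_instance

def pvWitness_largest1BorderedSquare : List (List Int) := [[1, 1], [1, 1]]

def Spec_largest1BorderedSquare (grid : List (List Int)) (out : Int) : Prop :=
  out = largest1BorderedSquare_alt grid
instance (grid : List (List Int)) (out : Int) : Decidable (Spec_largest1BorderedSquare grid out) := by
  unfold Spec_largest1BorderedSquare; infer_instance

-- ===== CLAIM (what is proved, stated in full; the proofs are below) =====
def Claim_equal_largest1BorderedSquare : Prop :=
  ∀ (grid : List (List Int)), Dom_largest1BorderedSquare grid →
    Pre_largest1BorderedSquare grid →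
    Spec_largest1BorderedSquare grid (largest1BorderedSquare grid)

-- ===== LEMMAS AND PROOFS =====

-- reference layer: run-length functions and a common "find best side" recursion

def pvP1 : Int → Bool := fun v => decide (v = 1)
def pvPZ : Int → Bool := fun v => decide (v ≠ 0)

-- run length of p-satisfying cells ending at index c
def pvRL (p : Int → Bool) (row : List Int) : Nat → Int
  | 0 => if p (row.getD 0 0) then 1 else 0
  | c + 1 => if p (row.getD (c + 1) 0) then pvRL p row c + 1 else 0

def pvCol (grid : List (List Int)) (c : Nat) : List Int := grid.map (fun row => row.getD c 0)

def pvVNZ (grid : List (List Int)) (c : Nat) : Nat → Int := pvRL pvPZ (pvCol grid c)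

def pvSeq (row : List Int) : Nat → Int
  | 0 => 0
  | c + 1 => pvRL pvP1 row c

-- the O(1) border test matching A's edge scans
def pvPred (grid : List (List Int)) (r c : Nat) (s : Int) : Bool :=
  decide (s ≤ pvRL pvPZ (grid.getD (r + (s - 1).toNat) []) c) &&
  decide (s - 1 ≤ pvVNZ grid c (r + (s - 1).toNat)) &&
  decide (s - 1 ≤ pvVNZ grid (c + 1 - s.toNat) (r + (s - 1).toNat))

-- first side in (best, k] passing pvPred, else best
def pvFIND (grid : List (List Int)) (r c : Nat) : Nat → Int → Int
  | 0, best => best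
  | k + 1, best =>
      if best < ((k : Int) + 1) then
        (if pvPred grid r c ((k : Int) + 1) then ((k : Int) + 1) else pvFIND grid r c k best)
      else best

def pvStep (grid : List (List Int)) (rows r : Nat) (best : Int) (c : Nat) : Int :=
  pvFIND grid r c (min (pvRL pvP1 (grid.getD r []) c) ((rows : Int) - (r : Int))).toNat best

def pvCols (grid : List (List Int)) (rows cols r cn : Nat) (best : Int) : Int :=
  ((List.range cols).drop cn).foldl (pvStep grid rows r) best

def pvRows (grid : List (List Int)) (rows cols rn : Nat) (best : Int) : Int :=
  ((List.range rows).drop rn).foldl (fun b r => pvCols grid rows cols r 0 b) best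

-- target shapes of the two tables and of "vprev"
def pvTabZ (grid : List (List Int)) (cols k : Nat) : List (List Int) :=
  (List.range k).map (fun r => (List.range cols).map (fun c => pvRL pvPZ (grid.getD r []) c))
def pvTabV (grid : List (List Int)) (cols k : Nat) : List (List Int) :=
  (List.range k).map (fun r => (List.range cols).map (fun c => pvVNZ grid c r))
def pvPrev (grid : List (List Int)) (cols k : Nat) : List Int :=
  if k = 0 then List.replicate cols 0 else (List.range cols).map (fun c => pvVNZ grid c (k - 1))

-- the per-row scan, as a pure list function
def pvRun (p : Int → Bool) : List Int → Int → List Int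
  | [], _ => []
  | v :: t, a => (if p v then a + 1 else 0) :: pvRun p t (if p v then a + 1 else 0)

-- ---------- small generic fold helpers ----------

theorem pvFoldlFixed {α : Type} (l : List α) (f : Int → α → Int) (b : Int)
    (h : ∀ x ∈ l, f b x = b) : l.foldl f b = b := by
  induction l with
  | nil => rfl
  | cons x t ih =>
      simp only [List.foldl_cons, h x (by simp)]
      exact ih (fun y hy => h y (by simp [hy]))

theorem pvFoldlPres {α : Type} (P : Int → Prop) (l : List α) (f : Int → α → Int)
    (h : ∀ acc x, P acc → P (f acc x)) : ∀ b, P b → P (l.foldl f b) := by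
  induction l with
  | nil => intro b hb; exact hb
  | cons x t ih => intro b hb; exact ih _ (h b x hb)

theorem pvFoldlCongrInv {α : Type} (P : Int → Prop) (l : List α) (f g : Int → α → Int)
    (h : ∀ x ∈ l, ∀ acc, P acc → f acc x = g acc x ∧ P (g acc x)) :
    ∀ b, P b → l.foldl f b = l.foldl g b := by
  induction l with
  | nil => intro b _; rfl
  | cons x t ih =>
      intro b hb
      have hx := h x (by simp) b hb
      simp only [List.foldl_cons, hx.1]
      exact ih (fun y hy => h y (by simp [hy])) _ hx.2

theorem pvDropRangeCons {n k : Nat} (h : k < n) :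
    (List.range n).drop k = k :: (List.range n).drop (k + 1) := by
  rw [List.drop_eq_getElem_cons (by simpa using h)]
  simp

theorem pvMemDropRange {n k x : Nat} (h : x ∈ (List.range n).drop k) : k ≤ x ∧ x < n := by
  obtain ⟨i, hi, hx⟩ := List.getElem_of_mem h
  have hlen : i < n - k := by simpa using hi
  rw [List.getElem_drop, List.getElem_range] at hx
  omega

-- ---------- run-length basics ----------

theorem pvRL_nonneg (p : Int → Bool) (row : List Int) : ∀ c, 0 ≤ pvRL p row c := by
  intro c
  induction c with
  | zero => simp only [pvRL]; split <;> omega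
  | succ c ih => simp only [pvRL]; split <;> omega

theorem pvRL_le (p : Int → Bool) (row : List Int) : ∀ c, pvRL p row c ≤ (c : Int) + 1 := by
  intro c
  induction c with
  | zero => simp only [pvRL]; split <;> omega
  | succ c ih => simp only [pvRL]; split <;> [push_cast; skip] <;> omega

theorem pvRL_ge_iff (p : Int → Bool) (row : List Int) :
    ∀ (k c : Nat), k ≤ c + 1 →
      (((k : Int) ≤ pvRL p row c) ↔ ∀ j : Nat, c + 1 - k ≤ j → j ≤ c → p (row.getD j 0) = true) := by
  intro k
  induction k with
  | zero =>
      intro c _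
      constructor
      · intro _ j hj1 hj2; omega
      · intro _; simpa using pvRL_nonneg p row c
  | succ k ih =>
      intro c hk
      cases c with
      | zero =>
          have hk0 : k = 0 := by omega
          subst hk0
          simp only [pvRL]
          constructor
          · intro h j hj1 hj2
            have hj : j = 0 := by omega
            subst hj
            by_contra hp
            rw [if_neg hp] at h
            omega
          · intro h
            rw [if_pos (h 0 (by omega) (by omega))]
            omega
      | succ c =>
          simp only [pvRL]
          by_cases hp : p (row.getD (c + 1) 0) = true
          · rw [if_pos hp]
            have ihc := ih c (by omega)
            constructor
            · intro h j hj1 hj2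
              rcases Nat.lt_or_ge j (c + 1) with hj | hj
              · have h' : (k : Int) ≤ pvRL p row c := by push_cast at h; omega
                exact (ihc.mp h') j (by omega) (by omega)
              · have hj' : j = c + 1 := by omega
                subst hj'; exact hp
            · intro h
              have h1 : (k : Int) ≤ pvRL p row c :=
                ihc.mpr (fun j hj1 hj2 => h j (by omega) (by omega))
              push_cast; omega
          · rw [if_neg hp]
            constructor
            · intro h; exfalso; push_cast at h; omega
            · intro h; exact absurd (h (c + 1) (by omega) (by omega)) hp

theorem pvCol_getD (grid : List (List Int)) (c j : Nat) (h : j < grid.length) :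
    (pvCol grid c).getD j 0 = (grid.getD j []).getD c 0 := by
  have h2 : j < (pvCol grid c).length := by simpa [pvCol] using h
  rw [List.getD_eq_getElem _ _ h2, List.getD_eq_getElem _ _ h]
  simp [pvCol]

-- ---------- pvFIND basics ----------

theorem pvFIND_nonneg (grid : List (List Int)) (r c : Nat) :
    ∀ k best, 0 ≤ best → 0 ≤ pvFIND grid r c k best := by
  intro k
  induction k with
  | zero => intro best h; simpa [pvFIND] using h
  | succ k ih =>
      intro best h
      simp only [pvFIND]
      split
      · split
        · omega
        · exact ih best h
      · exact h

theorem pvFIND_le (grid : List (List Int)) (r c : Nat) :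
    ∀ (k : Nat) (best : Int), (k : Int) ≤ best → pvFIND grid r c k best = best := by
  intro k best h
  cases k with
  | zero => simp [pvFIND]
  | succ k =>
      simp only [pvFIND]
      rw [if_neg (by push_cast at h ⊢; omega)]

theorem pvStep_nonneg (grid : List (List Int)) (rows r : Nat) (best : Int) (c : Nat)
    (h : 0 ≤ best) : 0 ≤ pvStep grid rows r best c := pvFIND_nonneg _ _ _ _ _ h

theorem pvStep_fixed (grid : List (List Int)) (rows r : Nat) (best : Int) (c : Nat)
    (h0 : 0 ≤ best) (h : (rows : Int) - (r : Int) ≤ best) : pvStep grid rows r best c = best := by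
  unfold pvStep
  apply pvFIND_le
  have hm : min (pvRL pvP1 (grid.getD r []) c) ((rows : Int) - (r : Int)) ≤ (rows : Int) - (r : Int) :=
    min_le_right _ _
  omega

-- ---------- pvG on casts ----------

theorem pvG_nat (grid : List (List Int)) (r c : Nat) :
    pvG grid (r : Int) (c : Int) = (grid.getD r []).getD c 0 := by
  unfold pvG
  rw [PySem.List.pyGetD_natCast, PySem.List.pyGetD_natCast]

-- ---------- A's per-side edge scans ↔ pvPred ----------

theorem pvCheck_eq (grid : List (List Int)) (rows cols : Nat)
    (hrows : rows = grid.length) (hrect : ∀ row ∈ grid, cols ≤ row.length)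
    (r c : Nat) (hr : r < rows) (hc : c < cols)
    (k : Nat) (hk1 : 1 ≤ k) (hkr : r + k ≤ rows) (hkc : k ≤ c + 1) :
    pvPred grid r c (k : Int) = true ↔
      (((PySem.List.pyRange ((r : Int) + 1) ((r : Int) + (k : Int)) 1).all
          (fun i => decide (pvG grid i (c : Int) ≠ 0) &&
                    decide (pvG grid i ((c : Int) - (k : Int) + 1) ≠ 0)) = true) ∧
       ((PySem.List.slice (PySem.List.pyGetD grid ((r : Int) + (k : Int) - 1) [])
            (some ((c : Int) - (k : Int) + 1)) (some ((c : Int) + 1))).all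
          (fun x => decide (x ≠ 0)) = true)) := by
  have hrbg : r + (k - 1) < grid.length := by omega
  have ht1 : ((k : Int) - 1).toNat = k - 1 := by omega
  have ht2 : ((k : Int)).toNat = k := by omega
  have hc1 : ((k : Int) - 1) = ((k - 1 : Nat) : Int) := by omega
  have HA' : ((k : Int) ≤ pvRL pvPZ (grid.getD (r + (k - 1)) []) c) ↔
      ∀ j : Nat, c + 1 - k ≤ j → j ≤ c → (grid.getD (r + (k - 1)) []).getD j 0 ≠ 0 := by
    rw [pvRL_ge_iff pvPZ _ k c hkc]
    simp [pvPZ]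
  have HB' : ∀ c' : Nat, (((k : Int) - 1 ≤ pvVNZ grid c' (r + (k - 1))) ↔
      ∀ j : Nat, r + 1 ≤ j → j ≤ r + (k - 1) → (grid.getD j []).getD c' 0 ≠ 0) := by
    intro c'
    rw [hc1]
    unfold pvVNZ
    rw [pvRL_ge_iff pvPZ (pvCol grid c') (k - 1) (r + (k - 1)) (by omega)]
    constructor
    · intro h j hj1 hj2
      have h2 := h j (by omega) hj2
      rw [pvCol_getD grid c' j (by omega)] at h2
      simpa [pvPZ] using h2
    · intro h j hj1 hj2
      rw [pvCol_getD grid c' j (by omega)]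
      simpa [pvPZ] using h j (by omega) hj2
  have hcc : ((c : Int) - (k : Int) + 1) = ((c + 1 - k : Nat) : Int) := by omega
  have hedge : ((PySem.List.pyRange ((r : Int) + 1) ((r : Int) + (k : Int)) 1).all
      (fun i => decide (pvG grid i (c : Int) ≠ 0) &&
                decide (pvG grid i ((c : Int) - (k : Int) + 1) ≠ 0)) = true) ↔
      ((∀ j : Nat, r + 1 ≤ j → j ≤ r + (k - 1) → (grid.getD j []).getD c 0 ≠ 0) ∧
       (∀ j : Nat, r + 1 ≤ j → j ≤ r + (k - 1) → (grid.getD j []).getD (c + 1 - k) 0 ≠ 0)) := by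
    rw [List.all_eq_true]
    constructor
    · intro h
      constructor <;> intro j hj1 hj2
      · have hm : ((j : Nat) : Int) ∈ PySem.List.pyRange ((r : Int) + 1) ((r : Int) + (k : Int)) 1 := by
          rw [PySem.List.mem_pyRange_one]
          constructor <;> push_cast <;> omega
        have h2 := h _ hm
        simp only [Bool.and_eq_true, decide_eq_true_eq] at h2
        have h3 := h2.1
        rwa [pvG_nat] at h3
      · have hm : ((j : Nat) : Int) ∈ PySem.List.pyRange ((r : Int) + 1) ((r : Int) + (k : Int)) 1 := by
          rw [PySem.List.mem_pyRange_one]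
          constructor <;> push_cast <;> omega
        have h2 := h _ hm
        simp only [Bool.and_eq_true, decide_eq_true_eq] at h2
        have h3 := h2.2
        rwa [hcc, pvG_nat] at h3
    · rintro ⟨h1, h2⟩ i hi
      rw [PySem.List.mem_pyRange_one] at hi
      obtain ⟨j, rfl⟩ : ∃ j : Nat, i = (j : Int) :=
        ⟨i.toNat, (Int.toNat_of_nonneg (by omega)).symm⟩
      simp only [Bool.and_eq_true, decide_eq_true_eq]
      constructor
      · rw [pvG_nat]
        exact h1 j (by omega) (by omega)
      · rw [hcc, pvG_nat]
        exact h2 j (by omega) (by omega)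
  have hbigrow : PySem.List.pyGetD grid ((r : Int) + (k : Int) - 1) [] = grid.getD (r + (k - 1)) [] := by
    have hcast : ((r : Int) + (k : Int) - 1) = ((r + (k - 1) : Nat) : Int) := by omega
    rw [hcast, PySem.List.pyGetD_natCast]
  have hrowlen : c < (grid.getD (r + (k - 1)) []).length := by
    have := hrect (grid.getD (r + (k - 1)) [])
      (by rw [List.getD_eq_getElem _ _ hrbg]; exact List.getElem_mem _)
    omega
  have hslice : PySem.List.slice (grid.getD (r + (k - 1)) [])
      (some ((c : Int) - (k : Int) + 1)) (some ((c : Int) + 1)) =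
      ((grid.getD (r + (k - 1)) []).drop (c + 1 - k)).take k := by
    have e1 : ((c : Int) + 1).toNat - ((c : Int) - (k : Int) + 1).toNat = k := by omega
    have e2 : ((c : Int) - (k : Int) + 1).toNat = c + 1 - k := by omega
    rw [PySem.List.slice_toNat _ (by omega) (by omega), e1, e2]
  have hbot : ((((grid.getD (r + (k - 1)) []).drop (c + 1 - k)).take k).all
      (fun x => decide (x ≠ 0)) = true) ↔
      (∀ j : Nat, c + 1 - k ≤ j → j ≤ c → (grid.getD (r + (k - 1)) []).getD j 0 ≠ 0) := by
    rw [List.all_eq_true]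
    constructor
    · intro h j hj1 hj2
      have hjlen : j < (grid.getD (r + (k - 1)) []).length := by omega
      have hidx : j - (c + 1 - k) <
          (((grid.getD (r + (k - 1)) []).drop (c + 1 - k)).take k).length := by
        rw [List.length_take, List.length_drop]
        omega
      have hmem : (grid.getD (r + (k - 1)) []).getD j 0 ∈
          ((grid.getD (r + (k - 1)) []).drop (c + 1 - k)).take k := by
        rw [List.getD_eq_getElem _ _ hjlen, List.mem_iff_getElem]
        refine ⟨j - (c + 1 - k), hidx, ?_⟩
        rw [List.getElem_take, List.getElem_drop]
        congr 1
        omega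
      simpa using h _ hmem
    · intro h x hx
      rw [List.mem_iff_getElem] at hx
      obtain ⟨i, hi, rfl⟩ := hx
      have hik : i < k := by
        rw [List.length_take, List.length_drop] at hi
        omega
      rw [List.getElem_take, List.getElem_drop]
      have hlen2 : (c + 1 - k) + i < (grid.getD (r + (k - 1)) []).length := by omega
      rw [← List.getD_eq_getElem _ 0 hlen2]
      simp only [decide_eq_true_eq]
      exact h ((c + 1 - k) + i) (by omega) (by omega)
  rw [hbigrow, hslice]
  unfold pvPred
  rw [ht1, ht2]
  simp only [Bool.and_eq_true, decide_eq_true_eq]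
  rw [HA', HB' c, HB' (c + 1 - k), hedge, hbot]
  tauto

-- ---------- A's side loop ↔ pvFIND ----------

theorem pvAside_eq (grid : List (List Int)) (rows cols : Nat)
    (hrows : rows = grid.length) (hrect : ∀ row ∈ grid, cols ≤ row.length)
    (r c : Nat) (hr : r < rows) (hc : c < cols) :
    ∀ k best, 0 ≤ best → r + k ≤ rows → k ≤ c + 1 →
      pvAside grid (r : Int) (c : Int) (k : Int) best = pvFIND grid r c k best := by
  intro k
  induction k with
  | zero =>
      intro best h0 _ _
      rw [pvAside, dif_neg (by push_cast; omega)]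
      simp [pvFIND]
  | succ k ih =>
      intro best h0 hkr hkc
      have hca : ((k + 1 : Nat) : Int) = (k : Int) + 1 := by push_cast; ring
      have hrec : ((k + 1 : Nat) : Int) - 1 = ((k : Nat) : Int) := by push_cast; ring
      rw [pvAside]
      simp only [pvFIND]
      by_cases hlt : best < (k : Int) + 1
      · rw [dif_pos (by push_cast; omega), if_pos hlt]
        have hchk := pvCheck_eq grid rows cols hrows hrect r c hr hc (k + 1)
          (by omega) (by omega) (by omega)
        have hside := ih best h0 (by omega) (by omega)
        by_cases hE : ((PySem.List.pyRange ((r : Int) + 1) ((r : Int) + ((k + 1 : Nat) : Int)) 1).all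
            (fun i => decide (pvG grid i (c : Int) ≠ 0) &&
                      decide (pvG grid i ((c : Int) - ((k + 1 : Nat) : Int) + 1) ≠ 0)) = true)
        · by_cases hB : ((PySem.List.slice (PySem.List.pyGetD grid ((r : Int) + ((k + 1 : Nat) : Int) - 1) [])
              (some ((c : Int) - ((k + 1 : Nat) : Int) + 1)) (some ((c : Int) + 1))).all
              (fun x => decide (x ≠ 0)) = true)
          · rw [if_neg (not_not_intro hE), if_neg (not_not_intro hB),
                if_pos (show pvPred grid r c ((k : Int) + 1) = true by
                  exact_mod_cast hchk.mpr ⟨hE, hB⟩)]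
            exact hca
          · rw [if_neg (not_not_intro hE), if_pos hB,
                if_neg (fun hPP => hB (hchk.mp (by exact_mod_cast hPP)).2), hrec, hside]
        · rw [if_pos hE,
              if_neg (fun hPP => hE (hchk.mp (by exact_mod_cast hPP)).1), hrec, hside]
      · rw [dif_neg (by push_cast; omega), if_neg hlt]

-- ---------- the tables ----------

theorem pvRun_length (p : Int → Bool) : ∀ (l : List Int) (a : Int), (pvRun p l a).length = l.length := by
  intro l
  induction l with
  | nil => intro a; rfl
  | cons v t ih => intro a; simp [pvRun, ih]

theorem pvScan_eq : ∀ (l : List (Int × Int)) (x y : List Int) (a : Int),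
    ∃ a', l.foldl pvScanStep (x, y, a) =
      (x ++ pvRun pvPZ (l.map Prod.fst) a,
       y ++ l.map (fun vp => if vp.1 ≠ 0 then vp.2 + 1 else 0), a') := by
  intro l
  induction l with
  | nil => intro x y a; exact ⟨a, by simp [pvRun]⟩
  | cons vp t ih =>
      intro x y a
      obtain ⟨a', h⟩ := ih (x ++ [if vp.1 ≠ 0 then a + 1 else 0])
        (y ++ [if vp.1 ≠ 0 then vp.2 + 1 else 0]) (if vp.1 ≠ 0 then a + 1 else 0)
      refine ⟨a', ?_⟩
      rw [List.foldl_cons]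
      have hstep : pvScanStep (x, y, a) vp =
          (x ++ [if vp.1 ≠ 0 then a + 1 else 0], y ++ [if vp.1 ≠ 0 then vp.2 + 1 else 0],
           if vp.1 ≠ 0 then a + 1 else 0) := rfl
      rw [hstep, h]
      simp [pvRun, pvPZ, List.append_assoc]

theorem pvRun_getD_succ (p : Int → Bool) :
    ∀ (c : Nat) (l : List Int) (a : Int), c + 1 < l.length →
      (pvRun p l a).getD (c + 1) 0 = if p (l.getD (c + 1) 0) then (pvRun p l a).getD c 0 + 1 else 0 := by
  intro c
  induction c with
  | zero =>
      intro l a h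
      match l, h with
      | v :: w :: t, _ => simp [pvRun, List.getD]
  | succ c ih =>
      intro l a h
      match l, h with
      | v :: t, h =>
          simp only [pvRun, List.getD_cons_succ]
          rw [ih t _ (by simpa using h)]

theorem pvRun_take_getD (p : Int → Bool) :
    ∀ (c n : Nat) (row : List Int), c < n → n ≤ row.length →
      (pvRun p (row.take n) 0).getD c 0 = pvRL p row c := by
  intro c
  induction c with
  | zero =>
      intro n row hc hn
      match n, row, hc, (by omega : 1 ≤ row.length) with
      | n + 1, v :: t, _, _ => simp [pvRun, pvRL, List.getD]
  | succ c ih =>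
      intro n row hc hn
      rw [pvRun_getD_succ p c (row.take n) 0 (by simp [List.length_take]; omega)]
      rw [ih n row (by omega) hn]
      have hgd : (row.take n).getD (c + 1) 0 = row.getD (c + 1) 0 := by
        rw [List.getD_eq_getElem _ _ (by simp [List.length_take]; omega),
            List.getD_eq_getElem _ _ (by omega), List.getElem_take]
      rw [hgd]
      rfl

theorem pvZipTake {α β : Type} : ∀ (l2 : List β) (l1 : List α),
    l1.zip l2 = (l1.take l2.length).zip l2 := by
  intro l2
  induction l2 with
  | nil => intro l1; simp
  | cons y t ih =>
      intro l1
      cases l1 with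
      | nil => simp
      | cons x s => simp [ih s]

theorem pvRunRow (p : Int → Bool) (row : List Int) (n : Nat) (h : n ≤ row.length) :
    pvRun p (row.take n) 0 = (List.range n).map (fun c => pvRL p row c) := by
  apply List.ext_getElem
  · simp [pvRun_length, List.length_take]; omega
  · intro i h1 h2
    have hi : i < n := by simpa using h2
    rw [← List.getD_eq_getElem (pvRun p (row.take n) 0) 0 h1,
        pvRun_take_getD p i n row hi h]
    simp

theorem pvPrev_length (grid : List (List Int)) (cols k : Nat) :
    (pvPrev grid cols k).length = cols := by
  unfold pvPrev; split <;> simp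

theorem pvZRow (grid : List (List Int)) (cols k : Nat) (hk : k < grid.length)
    (hlen : cols ≤ (grid.getD k []).length) :
    ((grid.getD k []).zip (pvPrev grid cols k)).map (fun vp => if vp.1 ≠ 0 then vp.2 + 1 else 0) =
      (List.range cols).map (fun c => pvVNZ grid c k) := by
  apply List.ext_getElem
  · rw [List.length_map, List.length_map, List.length_zip, pvPrev_length, List.length_range]
    omega
  · intro i h1 h2
    have hi : i < cols := by simpa using h2
    have hiz : i < ((grid.getD k []).zip (pvPrev grid cols k)).length := by
      rw [List.length_zip, pvPrev_length]; omega
    have hirow : i < (grid.getD k []).length := by omega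
    simp only [List.getElem_map, List.getElem_range, List.getElem_zip]
    have hrowD : (grid.getD k [])[i] = (grid.getD k []).getD i 0 :=
      (List.getD_eq_getElem _ _ hirow).symm
    have hcol : (pvCol grid i).getD k 0 = (grid.getD k []).getD i 0 := pvCol_getD grid i k hk
    cases k with
    | zero =>
        have hprev : (pvPrev grid cols 0)[i]'(by rw [pvPrev_length]; omega) = 0 := by
          simp [pvPrev]
        rw [hprev, hrowD]
        simp only [pvVNZ, pvRL, hcol, pvPZ]
        split <;> rename_i hsp
        · rw [if_pos (by simpa using hsp)]; omega
        · rw [if_neg (by simpa using hsp)]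
    | succ k' =>
        have hprev : (pvPrev grid cols (k' + 1))[i]'(by rw [pvPrev_length]; omega) =
            pvVNZ grid i k' := by
          simp [pvPrev]
        rw [hprev, hrowD]
        simp only [pvVNZ, pvRL, hcol, pvPZ]
        split <;> rename_i hsp
        · rw [if_pos (by simpa using hsp)]
        · rw [if_neg (by simpa using hsp)]

theorem pvBuildStep_eq (t1 t2 : List (List Int)) (prev row : List Int) :
    pvBuildStep (t1, t2, prev) row =
      (t1 ++ [pvRun pvPZ (row.take prev.length) 0],
       t2 ++ [(row.zip prev).map (fun vp => if vp.1 ≠ 0 then vp.2 + 1 else 0)],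
       (row.zip prev).map (fun vp => if vp.1 ≠ 0 then vp.2 + 1 else 0)) := by
  obtain ⟨a', hscan⟩ := pvScan_eq (row.zip prev) [] [] 0
  have hfst : (row.zip prev).map Prod.fst = row.take prev.length := by
    rw [pvZipTake prev row]
    exact List.map_fst_zip (by simp [List.length_take])
  simp only [pvBuildStep]
  rw [hscan, hfst]
  simp

theorem pvBuild_take (grid : List (List Int)) (cols : Nat)
    (hrect : ∀ row ∈ grid, cols ≤ row.length) :
    ∀ k, k ≤ grid.length →
      (grid.take k).foldl pvBuildStep ([], [], List.replicate cols 0) =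
        (pvTabZ grid cols k, pvTabV grid cols k, pvPrev grid cols k) := by
  intro k
  induction k with
  | zero => intro _; simp [pvTabZ, pvTabV, pvPrev]
  | succ k ih =>
      intro hk
      have hklen : k < grid.length := by omega
      have htake : grid.take (k + 1) = grid.take k ++ [grid.getD k []] := by
        rw [List.take_succ, List.getElem?_eq_getElem hklen,
            List.getD_eq_getElem _ _ hklen]
        simp
      rw [htake, List.foldl_append, ih (by omega)]
      simp only [List.foldl_cons, List.foldl_nil]
      have hrowlen : cols ≤ (grid.getD k []).length := by
        apply hrect
        rw [List.getD_eq_getElem _ _ hklen]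
        exact List.getElem_mem _
      have hp := pvPrev_length grid cols k
      rw [pvBuildStep_eq, hp]
      rw [pvRunRow pvPZ _ cols hrowlen, pvZRow grid cols k hklen hrowlen]
      unfold pvTabZ pvTabV pvPrev
      simp [List.range_succ]

theorem pvTables_eq (grid : List (List Int)) (cols : Nat)
    (hrect : ∀ row ∈ grid, cols ≤ row.length) :
    pvTables grid cols =
      (pvTabZ grid cols grid.length, pvTabV grid cols grid.length, pvPrev grid cols grid.length) := by
  have h := pvBuild_take grid cols hrect grid.length le_rfl
  rw [List.take_length] at h
  exact h

theorem pvTab_lookup (grid : List (List Int)) (cols : Nat) (f : Nat → Nat → Int)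
    (r c : Nat) (hr : r < grid.length) (hc : c < cols) :
    ((((List.range grid.length).map
        (fun r => (List.range cols).map (fun c => f r c))).getD r []).getD c 0) = f r c := by
  have hr2 : r < ((List.range grid.length).map
      (fun r => (List.range cols).map (fun c => f r c))).length := by simpa using hr
  rw [List.getD_eq_getElem _ _ hr2]
  simp only [List.getElem_map, List.getElem_range]
  have hc2 : c < ((List.range cols).map (fun c => f r c)).length := by simpa using hc
  rw [List.getD_eq_getElem _ _ hc2]
  simp

-- ---------- B's while ↔ pvFIND ----------

theorem pvBwhile_eq (grid : List (List Int)) (rows cols : Nat)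
    (hrows : rows = grid.length) (hrect : ∀ row ∈ grid, cols ≤ row.length)
    (r c : Nat) (hr : r < rows) (hc : c < cols) :
    ∀ k best, 0 ≤ best → r + k ≤ rows → k ≤ c + 1 →
      pvBwhile (pvTabZ grid cols rows) (pvTabV grid cols rows) (r : Int) (c : Int) (k : Int) best =
        pvFIND grid r c k best := by
  intro k
  induction k with
  | zero =>
      intro best h0 _ _
      rw [pvBwhile, dif_neg (by push_cast; omega)]
      simp [pvFIND]
  | succ k ih =>
      intro best h0 hkr hkc
      rw [pvBwhile]
      simp only [pvFIND]
      by_cases hlt : best < (k : Int) + 1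
      · rw [dif_pos (by push_cast; omega), if_pos hlt]
        have e1 : (r : Int) + ((k + 1 : Nat) : Int) - 1 = ((r + k : Nat) : Int) := by push_cast; ring
        have e2 : (c : Int) - ((k + 1 : Nat) : Int) + 1 = ((c - k : Nat) : Int) := by omega
        have hZ : pvG (pvTabZ grid cols rows) ((r + k : Nat) : Int) ((c : Nat) : Int) =
            pvRL pvPZ (grid.getD (r + k) []) c := by
          rw [pvG_nat]
          unfold pvTabZ
          rw [hrows]
          exact pvTab_lookup grid cols _ (r + k) c (by omega) (by omega)
        have hV1 : pvG (pvTabV grid cols rows) ((r + k : Nat) : Int) ((c : Nat) : Int) =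
            pvVNZ grid c (r + k) := by
          rw [pvG_nat]
          unfold pvTabV
          rw [hrows]
          exact pvTab_lookup grid cols _ (r + k) c (by omega) (by omega)
        have hV2 : pvG (pvTabV grid cols rows) ((r + k : Nat) : Int) ((c - k : Nat) : Int) =
            pvVNZ grid (c - k) (r + k) := by
          rw [pvG_nat]
          unfold pvTabV
          rw [hrows]
          exact pvTab_lookup grid cols _ (r + k) (c - k) (by omega) (by omega)
        rw [e1, e2, hZ, hV1, hV2]
        have hpred : (pvPred grid r c ((k : Int) + 1) = true) ↔
            (((k + 1 : Nat) : Int) ≤ pvRL pvPZ (grid.getD (r + k) []) c ∧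
             ((k + 1 : Nat) : Int) - 1 ≤ pvVNZ grid c (r + k) ∧
             ((k + 1 : Nat) : Int) - 1 ≤ pvVNZ grid (c - k) (r + k)) := by
          unfold pvPred
          rw [show (((k : Int) + 1) - 1).toNat = k from by omega,
              show ((k : Int) + 1).toNat = k + 1 from by omega,
              show c + 1 - (k + 1) = c - k from by omega]
          simp only [Bool.and_eq_true, decide_eq_true_eq]
          constructor
          · rintro ⟨⟨hh1, hh2⟩, hh3⟩
            refine ⟨by push_cast; omega, by push_cast; omega, by push_cast; omega⟩
          · rintro ⟨hh1, hh2, hh3⟩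
            refine ⟨⟨by push_cast at hh1 ⊢; omega, by push_cast at hh2 ⊢; omega⟩,
              by push_cast at hh3 ⊢; omega⟩
        rw [if_congr hpred.symm rfl rfl]
        split_ifs with hC
        · push_cast
          ring
        · rw [show ((k + 1 : Nat) : Int) - 1 = ((k : Nat) : Int) from by push_cast; ring]
          exact ih best h0 (by omega) (by omega)
      · rw [dif_neg (by push_cast; omega), if_neg hlt]

-- ---------- A's loops ↔ the reference ----------

theorem pvSeqStep (row : List Int) (cn : Nat) :
    (if row.getD cn 0 = 1 then pvSeq row cn + 1 else 0) = pvRL pvP1 row cn := by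
  cases cn with
  | zero =>
      by_cases hv : row.getD 0 0 = 1
      · rw [if_pos hv]
        simp only [pvSeq, pvRL]
        rw [if_pos (show pvP1 (row.getD 0 0) = true by
          simp only [pvP1, decide_eq_true_eq]; exact hv)]
        omega
      · rw [if_neg hv]
        simp only [pvRL]
        rw [if_neg (show ¬pvP1 (row.getD 0 0) = true by
          simp only [pvP1, decide_eq_true_eq]; exact hv)]
  | succ c' =>
      by_cases hv : row.getD (c' + 1) 0 = 1
      · rw [if_pos hv]
        simp only [pvSeq, pvRL]
        rw [if_pos (show pvP1 (row.getD (c' + 1) 0) = true by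
          simp only [pvP1, decide_eq_true_eq]; exact hv)]
      · rw [if_neg hv]
        simp only [pvRL]
        rw [if_neg (show ¬pvP1 (row.getD (c' + 1) 0) = true by
          simp only [pvP1, decide_eq_true_eq]; exact hv)]

theorem pvColsCons (grid : List (List Int)) (rows cols r : Nat) {cn : Nat} (h : cn < cols)
    (b : Int) : pvCols grid rows cols r cn b =
      pvCols grid rows cols r (cn + 1) (pvStep grid rows r b cn) := by
  unfold pvCols
  rw [pvDropRangeCons h]
  rfl

theorem pvRowsCons (grid : List (List Int)) (rows cols : Nat) {rn : Nat} (h : rn < rows)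
    (b : Int) : pvRows grid rows cols rn b =
      pvRows grid rows cols (rn + 1) (pvCols grid rows cols rn 0 b) := by
  unfold pvRows
  rw [pvDropRangeCons h]
  rfl

theorem pvColsFixed (grid : List (List Int)) (rows cols x cn : Nat) (F : Int)
    (h0 : 0 ≤ F) (h : (rows : Int) - (x : Int) ≤ F) : pvCols grid rows cols x cn F = F := by
  unfold pvCols
  exact pvFoldlFixed _ _ _ (fun y _ => pvStep_fixed grid rows x F y h0 h)

theorem pvColsNonneg (grid : List (List Int)) (rows cols r cn : Nat) (b : Int) (hb : 0 ≤ b) :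
    0 ≤ pvCols grid rows cols r cn b :=
  pvFoldlPres (fun x => 0 ≤ x) _ _ (fun acc x hacc => pvStep_nonneg grid rows r acc x hacc) b hb

theorem pvColEq (grid : List (List Int)) (rows cols : Nat)
    (hrows : rows = grid.length) (hrect : ∀ row ∈ grid, cols ≤ row.length)
    (r : Nat) (hr : r < rows) :
    ∀ m cn sequence best, cn + m = cols → sequence = pvSeq (grid.getD r []) cn → 0 ≤ best →
      (pvAcol grid (rows : Int) (cols : Int) (r : Int) (cn : Int) sequence best =
          Sum.inr (pvCols grid rows cols r cn best)) ∨
      (pvAcol grid (rows : Int) (cols : Int) (r : Int) (cn : Int) sequence best =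
          Sum.inl (pvCols grid rows cols r cn best * pvCols grid rows cols r cn best) ∧
        (rows : Int) - (r : Int) ≤ pvCols grid rows cols r cn best) := by
  intro m
  induction m with
  | zero =>
      intro cn sequence best hm hseq hb
      have hcn : cn = cols := by omega
      left
      rw [pvAcol, dif_neg (by push_cast; omega)]
      unfold pvCols
      rw [List.drop_eq_nil_of_le (by simp [hcn])]
      rfl
  | succ m ih =>
      intro cn sequence best hm hseq hb
      have hcn : cn < cols := by omega
      rw [pvAcol, dif_pos (by push_cast; omega)]
      have hseq' : (if pvG grid (r : Int) (cn : Int) = 1 then sequence + 1 else 0) =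
          pvRL pvP1 (grid.getD r []) cn := by
        rw [pvG_nat, hseq]
        exact pvSeqStep (grid.getD r []) cn
      by_cases hret : (rows : Int) - (r : Int) ≤ best
      · rw [if_pos hret]
        right
        have hfix : pvCols grid rows cols r cn best = best := by
          unfold pvCols
          exact pvFoldlFixed _ _ _ (fun x _ => pvStep_fixed grid rows r best x hb hret)
        rw [hfix]
        exact ⟨rfl, hret⟩
      · rw [if_neg hret]
        simp only [hseq']
        by_cases hskip : pvRL pvP1 (grid.getD r []) cn ≤ best
        · rw [if_pos hskip]
          have hstepfix : pvStep grid rows r best cn = best := by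
            unfold pvStep
            apply pvFIND_le
            have hmin : min (pvRL pvP1 (grid.getD r []) cn) ((rows : Int) - (r : Int)) ≤
                pvRL pvP1 (grid.getD r []) cn := min_le_left _ _
            omega
          have hrec := ih (cn + 1) (pvRL pvP1 (grid.getD r []) cn) best (by omega)
            (by simp [pvSeq]) hb
          push_cast at hrec
          rw [pvColsCons grid rows cols r hcn best, hstepfix]
          exact hrec
        · rw [if_neg hskip]
          have hm0 : 0 ≤ min (pvRL pvP1 (grid.getD r []) cn) ((rows : Int) - (r : Int)) := by
            have := pvRL_nonneg pvP1 (grid.getD r []) cn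
            exact le_min this (by omega)
          have hmk : (((min (pvRL pvP1 (grid.getD r []) cn)
              ((rows : Int) - (r : Int))).toNat : Nat) : Int) =
              min (pvRL pvP1 (grid.getD r []) cn) ((rows : Int) - (r : Int)) :=
            Int.toNat_of_nonneg hm0
          have hmin1 : min (pvRL pvP1 (grid.getD r []) cn) ((rows : Int) - (r : Int)) ≤
              pvRL pvP1 (grid.getD r []) cn := min_le_left _ _
          have hmin2 : min (pvRL pvP1 (grid.getD r []) cn) ((rows : Int) - (r : Int)) ≤
              (rows : Int) - (r : Int) := min_le_right _ _
          have hRLle := pvRL_le pvP1 (grid.getD r []) cn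
          have haside : pvAside grid (r : Int) (cn : Int)
              (min (pvRL pvP1 (grid.getD r []) cn) ((rows : Int) - (r : Int))) best =
              pvStep grid rows r best cn := by
            rw [← hmk]
            exact pvAside_eq grid rows cols hrows hrect r cn hr hcn _ best hb
              (by omega) (by omega)
          rw [haside]
          have hrec := ih (cn + 1) (pvRL pvP1 (grid.getD r []) cn)
            (pvStep grid rows r best cn) (by omega) (by simp [pvSeq])
            (pvStep_nonneg grid rows r best cn hb)
          push_cast at hrec
          rw [pvColsCons grid rows cols r hcn best]
          exact hrec

theorem pvRowEq (grid : List (List Int)) (rows cols : Nat)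
    (hrows : rows = grid.length) (hrect : ∀ row ∈ grid, cols ≤ row.length) :
    ∀ m rn best, rn + m = rows → 0 ≤ best →
      pvArow grid (rows : Int) (cols : Int) (rn : Int) best =
        pvRows grid rows cols rn best * pvRows grid rows cols rn best := by
  intro m
  induction m with
  | zero =>
      intro rn best hm hb
      have hrn : rn = rows := by omega
      rw [pvArow, dif_neg (by push_cast; omega)]
      unfold pvRows
      rw [List.drop_eq_nil_of_le (by simp [hrn])]
      rfl
  | succ m ih =>
      intro rn best hm hb
      have hrn : rn < rows := by omega
      rw [pvArow, dif_pos (by push_cast; omega)]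
      have hcol := pvColEq grid rows cols hrows hrect rn hrn cols 0 0 best (by omega) rfl hb
      have hFnn : 0 ≤ pvCols grid rows cols rn 0 best := pvColsNonneg grid rows cols rn 0 best hb
      simp only [Nat.cast_zero] at hcol
      rcases hcol with hcol | ⟨hcol, hge⟩
      · rw [hcol]
        have hrec := ih (rn + 1) (pvCols grid rows cols rn 0 best) (by omega) hFnn
        push_cast at hrec
        rw [pvRowsCons grid rows cols hrn best]
        exact hrec
      · rw [hcol]
        rw [pvRowsCons grid rows cols hrn best]
        have hfixrows : pvRows grid rows cols (rn + 1) (pvCols grid rows cols rn 0 best) =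
            pvCols grid rows cols rn 0 best := by
          unfold pvRows
          apply pvFoldlFixed
          intro x hx
          have hxb := pvMemDropRange hx
          refine pvColsFixed grid rows cols x 0 _ hFnn ?_
          have hcast : ((x : Nat) : Int) ≥ (rn : Int) + 1 := by exact_mod_cast hxb.1
          omega
        rw [hfixrows]

theorem pvBColEq (grid : List (List Int)) (rows cols : Nat)
    (hrows : rows = grid.length) (hrect : ∀ row ∈ grid, cols ≤ row.length)
    (r : Nat) (hr : r < rows) :
    ∀ m cn seq best, cn + m = cols → seq = pvSeq (grid.getD r []) cn → 0 ≤ best →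
      (((List.range cols).drop cn).foldl
          (fun (sb : Int × Int) (c : Nat) =>
            ((if pvG grid ((r : Nat) : Int) ((c : Nat) : Int) = 1 then sb.1 + 1 else 0),
             pvBwhile (pvTabZ grid cols rows) (pvTabV grid cols rows)
                ((r : Nat) : Int) ((c : Nat) : Int)
                (min (if pvG grid ((r : Nat) : Int) ((c : Nat) : Int) = 1 then sb.1 + 1 else 0)
                  (((rows : Nat) : Int) - ((r : Nat) : Int))) sb.2))
          (seq, best)).2 = pvCols grid rows cols r cn best := by
  intro m
  induction m with
  | zero =>
      intro cn seq best hm hseq hb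
      have hcn : cn = cols := by omega
      unfold pvCols
      rw [List.drop_eq_nil_of_le (by simp [hcn])]
      rfl
  | succ m ih =>
      intro cn seq best hm hseq hb
      have hcn : cn < cols := by omega
      rw [pvDropRangeCons hcn, List.foldl_cons, pvColsCons grid rows cols r hcn best]
      have hseq' : (if pvG grid ((r : Nat) : Int) ((cn : Nat) : Int) = 1 then seq + 1 else 0) =
          pvRL pvP1 (grid.getD r []) cn := by
        rw [pvG_nat, hseq]
        exact pvSeqStep (grid.getD r []) cn
      simp only
      rw [hseq']
      have hm0 : 0 ≤ min (pvRL pvP1 (grid.getD r []) cn) ((rows : Int) - (r : Int)) := by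
        have := pvRL_nonneg pvP1 (grid.getD r []) cn
        exact le_min this (by omega)
      have hmin1 : min (pvRL pvP1 (grid.getD r []) cn) ((rows : Int) - (r : Int)) ≤
          pvRL pvP1 (grid.getD r []) cn := min_le_left _ _
      have hmin2 : min (pvRL pvP1 (grid.getD r []) cn) ((rows : Int) - (r : Int)) ≤
          (rows : Int) - (r : Int) := min_le_right _ _
      have hRLle := pvRL_le pvP1 (grid.getD r []) cn
      have hwhile : pvBwhile (pvTabZ grid cols rows) (pvTabV grid cols rows)
          ((r : Nat) : Int) ((cn : Nat) : Int)
          (min (pvRL pvP1 (grid.getD r []) cn) (((rows : Nat) : Int) - ((r : Nat) : Int))) best =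
          pvStep grid rows r best cn := by
        rw [← Int.toNat_of_nonneg hm0]
        exact pvBwhile_eq grid rows cols hrows hrect r cn hr hcn _ best hb
          (by omega) (by omega)
      rw [hwhile]
      exact ih (cn + 1) (pvRL pvP1 (grid.getD r []) cn) (pvStep grid rows r best cn)
        (by omega) (by simp [pvSeq]) (pvStep_nonneg grid rows r best cn hb)

theorem pvAlt_eq (grid : List (List Int)) (rows cols : Nat)
    (hrows : rows = grid.length) (hcols : cols = (grid.getD 0 []).length)
    (hrect : ∀ row ∈ grid, cols ≤ row.length) :
    largest1BorderedSquare_alt grid =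
      pvRows grid rows cols 0 0 * pvRows grid rows cols 0 0 := by
  have h0 : PySem.List.pyGetD grid 0 [] = grid.getD 0 [] := by
    simpa using PySem.List.pyGetD_natCast grid 0 []
  unfold largest1BorderedSquare_alt
  rw [h0, ← hcols, ← hrows, pvTables_eq grid cols hrect, ← hrows]
  simp only [PySem.List.pyRange_zero_nat, List.foldl_map]
  suffices h : (List.range rows).foldl
      (fun best r => (((List.range cols).foldl
        (fun (sb : Int × Int) (c : Nat) =>
          ((if pvG grid ((r : Nat) : Int) ((c : Nat) : Int) = 1 then sb.1 + 1 else 0),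
           pvBwhile (pvTabZ grid cols rows) (pvTabV grid cols rows)
              ((r : Nat) : Int) ((c : Nat) : Int)
              (min (if pvG grid ((r : Nat) : Int) ((c : Nat) : Int) = 1 then sb.1 + 1 else 0)
                (((rows : Nat) : Int) - ((r : Nat) : Int))) sb.2))
        ((0 : Int), best)).2)) 0 =
      pvRows grid rows cols 0 0 by
    rw [h]
  unfold pvRows
  simp only [List.drop_zero]
  refine pvFoldlCongrInv (fun b => 0 ≤ b) _ _ _ ?_ 0 le_rfl
  intro rr hrr acc hacc
  have hrr' : rr < rows := List.mem_range.mp hrr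
  have hcol := pvBColEq grid rows cols hrows hrect rr hrr' cols 0 0 acc (by omega) rfl hacc
  simp only [List.drop_zero] at hcol
  exact ⟨hcol, pvColsNonneg grid rows cols rr 0 acc hacc⟩

-- ===== VERDICT (by name: the statement is the Claim_ definition above) =====
theorem largest1BorderedSquare_spec : Claim_equal_largest1BorderedSquare := by
  intro grid _ hpre
  obtain ⟨hne, hrect0⟩ := hpre
  have hhead : grid.headD [] = grid.getD 0 [] := by cases grid with | nil => rfl | cons h t => rfl
  have hrect : ∀ row ∈ grid, (grid.getD 0 []).length ≤ row.length := by
    intro row hrow; have := hrect0 row hrow; rwa [hhead] at this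
  unfold Spec_largest1BorderedSquare largest1BorderedSquare
  have h0 : PySem.List.pyGetD grid 0 [] = grid.getD 0 [] := by
    have := PySem.List.pyGetD_natCast grid 0 []
    simpa using this
  rw [h0]
  have h1 := pvRowEq grid grid.length (grid.getD 0 []).length rfl hrect grid.length 0 0 (by omega) le_rfl
  simp only [Nat.cast_zero] at h1
  rw [h1, pvAlt_eq grid grid.length (grid.getD 0 []).length rfl rfl hrect]
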